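-- pv_equiv track=rewrite | github.com/jegali/CPyU | CPU/v8/emulatorWindow.py | convert2ascii
-- ===== SOURCE A (Python) =====
-- def convert2ascii(memblock):
--     ascii_str = ''
--     for i in memblock:
--         if 0x20 < ord(chr(i)) < 0x7F:
--             ascii_str += chr(i)
--         else:
--             ascii_str += "."
--     return ascii_str
-- ===== SOURCE B (Python) =====
-- # Run-length segmentation: scan maximal runs of printable / non-printable values,
-- # decode a printable run in bulk via bytes(...).decode, emit '.'*len for the rest.
-- def convert2ascii(memblock):
--     parts = []
--     n = len(memblock)
--     k = 0
--     while k < n: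
--         if 0x20 < memblock[k] < 0x7F:
--             j = k
--             while j < n and 0x20 < memblock[j] < 0x7F:
--                 j += 1
--             parts.append(bytes(memblock[k:j]).decode('ascii'))
--         else:
--             j = k
--             while j < n and not (0x20 < memblock[j] < 0x7F):
--                 j += 1
--             parts.append('.' * (j - k))
--         k = j
--     return ''.join(parts)
-- ===== Notes on version B (the rewrite author's own statement) =====
-- stated objective: alternative
-- what changed: Replaces the per-byte branch-and-concatenate loop with run-length segmentation: scan maximal printable / non-printable runs, bulk-decode printable runs with bytes().decode and emit '.'*len for the others, joining once.
-- crash fix: On inputs containing an element outside 0..0x10FFFF A raises ValueError (chr() arg not in range); B returns the string with '.' at those positions. — e.g. on convert2ascii([-1]): A raises ValueError, B returns "."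
import Mathlib
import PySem

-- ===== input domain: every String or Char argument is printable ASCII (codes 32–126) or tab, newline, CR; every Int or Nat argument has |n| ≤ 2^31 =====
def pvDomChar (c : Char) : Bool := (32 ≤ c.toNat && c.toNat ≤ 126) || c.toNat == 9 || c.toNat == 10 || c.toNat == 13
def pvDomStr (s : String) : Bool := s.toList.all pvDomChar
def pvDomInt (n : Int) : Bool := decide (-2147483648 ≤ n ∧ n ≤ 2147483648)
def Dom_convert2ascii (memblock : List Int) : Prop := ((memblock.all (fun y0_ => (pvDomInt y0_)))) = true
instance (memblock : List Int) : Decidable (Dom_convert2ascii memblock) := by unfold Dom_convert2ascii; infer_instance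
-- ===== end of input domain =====

-- B replaces A's per-byte branch-and-concatenate loop with run-length segmentation over maximal printable / non-printable runs (return value only).


-- ===== PORT A =====
-- A: loop over memblock, append chr(i) if 0x20 < ord(chr(i)) < 0x7F (= 0x20 < i < 0x7F) else '.'
def convert2ascii (memblock : List Int) : String :=
  memblock.foldl
    (fun ascii_str i =>
      if 0x20 < i ∧ i < 0x7F then ascii_str ++ (Char.ofNat i.toNat).toString
      else ascii_str ++ ".")
    ""

-- ===== PORT B =====
def pvPrintable (i : Int) : Bool := 0x20 < i && i < 0x7F

-- B's outer while-loop: each step consumes one maximal run (the inner while = takeWhile/dropWhile);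
-- bytes(run).decode('ascii') becomes String.ofList of the run's chars, '.'*(j-k) becomes a replicate.
def pvRuns_convert2ascii : List Int → List String
  | [] => []
  | i :: rest =>
      let p := pvPrintable i
      let run := i :: rest.takeWhile (fun j => pvPrintable j == p)
      let rest' := rest.dropWhile (fun j => pvPrintable j == p)
      (if p then String.ofList (run.map (fun j => Char.ofNat j.toNat))
       else String.ofList (List.replicate run.length '.')) :: pvRuns_convert2ascii rest'
termination_by l => l.length
decreasing_by
  have h := List.length_dropWhile_le (fun j => pvPrintable j == pvPrintable i) rest
  have h2 : (i :: rest).length = rest.length + 1 := rfl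
  omega

def convert2ascii_alt (memblock : List Int) : String :=
  String.join (pvRuns_convert2ascii memblock)

-- ===== PRECONDITION & SPEC =====
-- Pre_ excludes exactly the inputs on which A raises ValueError: an element outside chr's range 0..0x10FFFF.
def Pre_convert2ascii (memblock : List Int) : Prop :=
  ∀ i ∈ memblock, 0 ≤ i ∧ i ≤ 1114111
instance (memblock : List Int) : Decidable (Pre_convert2ascii memblock) := by unfold Pre_convert2ascii; infer_instance

def pvWitness_convert2ascii : List Int := [72, 105, 0, 200, 33, 126, 127, 32]

-- On inputs containing an element outside 0..0x10FFFF A raises ValueError (chr() arg not in range); B returns the string with '.' at those positions.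
def Raises_convert2ascii (memblock : List Int) : Prop :=
  ∃ i ∈ memblock, i < 0 ∨ i > 1114111
instance (memblock : List Int) : Decidable (Raises_convert2ascii memblock) := by unfold Raises_convert2ascii; infer_instance

def pvRaiseWitness_convert2ascii : List Int := [-1]
def pvRaiseWitnessOut_convert2ascii : String := "."

def Spec_convert2ascii (memblock : List Int) (out : String) : Prop := out = convert2ascii_alt memblock
instance (memblock : List Int) (out : String) : Decidable (Spec_convert2ascii memblock out) := by unfold Spec_convert2ascii; infer_instance

-- ===== CLAIM (what is proved, stated in full; the proofs are below) =====
def Claim_equal_convert2ascii : Prop := ∀ (memblock : List Int), Dom_convert2ascii memblock → Pre_convert2ascii memblock → Spec_convert2ascii memblock (convert2ascii memblock)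

def Claim_raises_convert2ascii : Prop := (∀ (memblock : List Int), Dom_convert2ascii memblock → Raises_convert2ascii memblock → ¬ Pre_convert2ascii memblock) ∧ (Dom_convert2ascii (pvRaiseWitness_convert2ascii) ∧ Raises_convert2ascii (pvRaiseWitness_convert2ascii) ∧ convert2ascii_alt (pvRaiseWitness_convert2ascii) = pvRaiseWitnessOut_convert2ascii)

-- ===== LEMMAS AND PROOFS =====

-- the per-element string both programs produce
def pvF (i : Int) : String :=
  if pvPrintable i then (Char.ofNat i.toNat).toString else "."

theorem toString_eq_ofList (c : Char) : c.toString = String.ofList [c] := by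
  apply String.toList_injective; simp

-- foldl of string append from any seed factors the seed out front
theorem foldl_strapp (l : List String) (s : String) :
    l.foldl (fun r s => r ++ s) s = s ++ l.foldl (fun r s => r ++ s) "" := by
  induction l generalizing s with
  | nil => simp
  | cons x rest ih =>
      simp only [List.foldl_cons]
      rw [ih (s ++ x), ih ("" ++ x)]
      simp [String.append_assoc]

theorem join_cons (s : String) (l : List String) :
    String.join (s :: l) = s ++ String.join l := by
  unfold String.join
  simp only [List.foldl_cons]
  rw [foldl_strapp]
  simp

-- append-accumulating foldl is a join of the per-element strings
theorem foldl_append_eq_join (l : List Int) (g : Int → String) (s : String) :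
    l.foldl (fun acc i => acc ++ g i) s = s ++ String.join (l.map g) := by
  induction l generalizing s with
  | nil => simp [String.join]
  | cons x rest ih =>
      simp only [List.foldl_cons, List.map_cons, ih, join_cons]
      simp [String.append_assoc]

theorem join_append (a b : List String) :
    String.join (a ++ b) = String.join a ++ String.join b := by
  induction a with
  | nil => simp [String.join]
  | cons x rest ih => simp [join_cons, ih, String.append_assoc]

-- a chunk whose elements all share printability p equals the join of its per-element strings
theorem chunk_eq_join (l : List Int) (p : Bool) (h : ∀ j ∈ l, pvPrintable j = p) :
    (if p then String.ofList (l.map (fun j => Char.ofNat j.toNat))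
     else String.ofList (List.replicate l.length '.')) = String.join (l.map pvF) := by
  induction l with
  | nil =>
      cases p <;> · apply String.toList_injective; simp [String.join]
  | cons x rest ih =>
      have hx : pvPrintable x = p := h x (by simp)
      have hr := ih (fun j hj => h j (by simp [hj]))
      cases p with
      | true =>
          simp only [if_pos] at hr ⊢
          rw [List.map_cons, List.map_cons, join_cons, ← hr, pvF, hx, if_pos rfl,
            ← List.singleton_append, String.ofList_append, toString_eq_ofList]
      | false =>
          simp only [Bool.false_eq_true, reduceIte] at hr ⊢
          rw [List.map_cons, join_cons, ← hr, pvF, hx, List.length_cons,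
            List.replicate_succ, ← List.singleton_append, String.ofList_append]
          rfl

theorem runs_join (l : List Int) :
    String.join (pvRuns_convert2ascii l) = String.join (l.map pvF) := by
  induction hn : l.length using Nat.strong_induction_on generalizing l with
  | _ n ih =>
    cases l with
    | nil => rw [pvRuns_convert2ascii.eq_def]; simp [String.join]
    | cons i rest =>
      rw [pvRuns_convert2ascii.eq_def]
      set p := pvPrintable i with hp
      set run := i :: rest.takeWhile (fun j => pvPrintable j == p) with hrun
      set rest' := rest.dropWhile (fun j => pvPrintable j == p) with hrest'
      have hlt : rest'.length < n := by
        have h := List.length_dropWhile_le (fun j => pvPrintable j == p) rest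
        subst hn; simp only [List.length_cons, hrest']; omega
      have hih := ih rest'.length hlt rest' rfl
      have hchunk := chunk_eq_join run p (by
        intro j hj
        rw [hrun] at hj
        rcases List.mem_cons.mp hj with h | h
        · rw [h]
        · exact beq_iff_eq.mp (List.mem_takeWhile_imp (p := fun j => pvPrintable j == p) h))
      rw [join_cons, hchunk, hih, ← join_append, ← List.map_append]
      have : run ++ rest' = i :: rest := by
        rw [hrun, List.cons_append, List.takeWhile_append_dropWhile]
      rw [this]

-- ===== VERDICT (by name: the statement is the Claim_ definition above) =====
theorem convert2ascii_spec : Claim_equal_convert2ascii := by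
  intro memblock _ _
  unfold Spec_convert2ascii convert2ascii convert2ascii_alt
  rw [runs_join]
  have : (fun ascii_str i =>
      if 0x20 < i ∧ i < 0x7F then ascii_str ++ (Char.ofNat i.toNat).toString
      else ascii_str ++ ".")
    = (fun acc i => acc ++ pvF i) := by
    funext acc i
    by_cases h : (0x20 : Int) < i ∧ i < 0x7F
    · have hb : pvPrintable i = true := by simp [pvPrintable]; omega
      simp [h, pvF, hb]
    · have hb : pvPrintable i = false := by
        rw [pvPrintable, Bool.and_eq_false_iff]
        rcases not_and_or.mp h with h' | h'
        · left; simpa using h'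
        · right; simpa using h'
      simp [h, pvF, hb]
  rw [this, foldl_append_eq_join]
  simp

@[simp] theorem convert2ascii_raises : Claim_raises_convert2ascii := by
  unfold Claim_raises_convert2ascii
  exact ⟨fun memblock _ h hpre => by
      obtain ⟨i, hi, hbad⟩ := h
      have := hpre i hi
      omega,
    by decide, by decide,
    by
      show convert2ascii_alt [-1] = "."
      unfold convert2ascii_alt
      rw [pvRuns_convert2ascii.eq_def]
      apply String.toList_injective
      simp [pvPrintable, String.join, pvRuns_convert2ascii.eq_def]⟩
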